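-- pv_equiv track=rewrite | github.com/madhumitha998/Python-Computational-Thinking | Q3/q3.py | ttsum
-- ===== SOURCE A (Python) =====
-- def ttsum(nums, t):
--   # your code here
--   new_list=[]
--   for f in range(0,len(nums)):
--     diff=t-nums[f]
--     for s in range(f+1,len(nums)):
--       if nums[s]==diff:
--         new_list.append([f,s])
--
--   for f in range(0,len(nums)):
--     diff=t-nums[f]
--     for s in range(f+1,len(nums)):
--       for l in range (s+1,len(nums)):
--         if nums[s]+nums[l]==diff:
--           new_list.append([f,s,l])
--   return new_list
-- ===== SOURCE B (Python) =====
-- def ttsum(nums, t):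
--   # Index every value once (value -> increasing list of indices), then look the
--   # needed complement up instead of scanning for it: O(n^2 + output) vs A's O(n^3).
--   occ = {}
--   for i in range(len(nums)):
--     occ.setdefault(nums[i], []).append(i)
--   res = []
--   for f in range(len(nums)):
--     for s in occ.get(t - nums[f], []):
--       if s > f:
--         res.append([f, s])
--   for f in range(len(nums)):
--     for s in range(f + 1, len(nums)):
--       for l in occ.get(t - nums[f] - nums[s], []):
--         if l > s:
--           res.append([f, s, l])
--   return res
-- ===== Notes on version B (the rewrite author's own statement) =====
-- stated objective: faster
-- what changed: B builds a hash map from value to its increasing list of indices once, then finds the partners for each pair/triple prefix by dictionary lookup instead of scanning the tail of the list, replacing A's O(n^3) triple scan by O(n^2 + output).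
import Mathlib
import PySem

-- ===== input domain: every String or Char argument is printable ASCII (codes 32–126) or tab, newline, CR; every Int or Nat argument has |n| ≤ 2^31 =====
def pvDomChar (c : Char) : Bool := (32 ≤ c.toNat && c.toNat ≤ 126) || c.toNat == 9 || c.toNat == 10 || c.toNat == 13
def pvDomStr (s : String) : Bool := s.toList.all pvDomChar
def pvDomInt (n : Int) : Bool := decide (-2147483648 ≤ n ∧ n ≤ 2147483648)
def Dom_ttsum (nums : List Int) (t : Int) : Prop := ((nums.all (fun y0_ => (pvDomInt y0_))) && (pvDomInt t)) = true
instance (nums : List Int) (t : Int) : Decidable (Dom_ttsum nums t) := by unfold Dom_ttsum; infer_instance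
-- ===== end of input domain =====

-- B replaces A's inner linear scans by one value→indices hash index built up front (faster, asymptotic change measured by the check).

-- ===== PORT A =====
def ttsum (nums : List Int) (t : Int) : List (List Int) :=
  let n := PySem.List.len nums
  let pairs :=
    (PySem.List.pyRange 0 n).foldl (fun acc f =>
      let diff := t - PySem.List.pyGetD nums f 0
      (PySem.List.pyRange (f+1) n).foldl (fun acc s =>
        if PySem.List.pyGetD nums s 0 = diff then acc ++ [[f, s]] else acc) acc) []
  (PySem.List.pyRange 0 n).foldl (fun acc f =>
    let diff := t - PySem.List.pyGetD nums f 0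
    (PySem.List.pyRange (f+1) n).foldl (fun acc s =>
      (PySem.List.pyRange (s+1) n).foldl (fun acc l =>
        if PySem.List.pyGetD nums s 0 + PySem.List.pyGetD nums l 0 = diff then acc ++ [[f, s, l]] else acc) acc) acc) pairs

-- ===== PORT B =====
-- occ.setdefault(nums[i], []).append(i): insert overwrites in place, matching Python's dict
def ttsumOcc (nums : List Int) : PySem.Dict Int (List Int) :=
  (PySem.List.pyRange 0 (PySem.List.len nums)).foldl
    (fun d i => d.insert (PySem.List.pyGetD nums i 0)
        (d.getD (PySem.List.pyGetD nums i 0) [] ++ [i])) PySem.Dict.empty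

def ttsum_alt (nums : List Int) (t : Int) : List (List Int) :=
  let n := PySem.List.len nums
  let occ := ttsumOcc nums
  let res := (PySem.List.pyRange 0 n).foldl (fun acc f =>
      (occ.getD (t - PySem.List.pyGetD nums f 0) []).foldl (fun acc s =>
        if f < s then acc ++ [[f, s]] else acc) acc) []
  (PySem.List.pyRange 0 n).foldl (fun acc f =>
    (PySem.List.pyRange (f+1) n).foldl (fun acc s =>
      (occ.getD (t - PySem.List.pyGetD nums f 0 - PySem.List.pyGetD nums s 0) []).foldl (fun acc l =>
        if s < l then acc ++ [[f, s, l]] else acc) acc) acc) res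

-- ===== PRECONDITION & SPEC =====
def Spec_ttsum (nums : List Int) (t : Int) (out : List (List Int)) : Prop := out = ttsum_alt nums t
instance (nums : List Int) (t : Int) (out : List (List Int)) : Decidable (Spec_ttsum nums t out) := by unfold Spec_ttsum; infer_instance

-- ===== CLAIM (what is proved, stated in full; the proofs are below) =====
def Claim_equal_ttsum : Prop := ∀ (nums : List Int) (t : Int), Dom_ttsum nums t → Spec_ttsum nums t (ttsum nums t)

-- ===== LEMMAS AND PROOFS =====
lemma ttsum_pyRange_nil {a b : Int} (h : b ≤ a) : PySem.List.pyRange a b = [] := by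
  apply List.eq_nil_iff_forall_not_mem.mpr
  intro x hx
  rw [PySem.List.mem_pyRange_one] at hx
  omega

lemma ttsum_filter_aux (a : Int) (ha : 0 ≤ a) (m : Nat) :
    (PySem.List.pyRange 0 (m : Int)).filter (fun x => decide (a < x)) = PySem.List.pyRange (a+1) (m : Int) := by
  induction m with
  | zero =>
    rw [Nat.cast_zero, ttsum_pyRange_nil (le_refl 0), ttsum_pyRange_nil (by omega : (0:Int) ≤ a + 1)]
    rfl
  | succ k ih =>
    have h1 : ((k+1 : Nat) : Int) = (k : Int) + 1 := by push_cast; ring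
    rw [h1, PySem.List.pyRange_one_succ_right (by positivity : (0:Int) ≤ (k:Int)), List.filter_append, ih]
    rcases lt_or_ge a (k : Int) with h | h
    · rw [PySem.List.pyRange_one_succ_right (by omega : a + 1 ≤ (k:Int))]
      simp [h]
    · rw [ttsum_pyRange_nil (by omega : (k:Int) ≤ a + 1), ttsum_pyRange_nil (by omega : (k:Int) + 1 ≤ a + 1)]
      simp [show ¬ a < (k:Int) by omega]

lemma ttsum_filter_pyRange (a b : Int) (ha : 0 ≤ a) :
    (PySem.List.pyRange 0 b).filter (fun x => decide (a < x)) = PySem.List.pyRange (a+1) b := by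
  rcases lt_or_ge 0 b with hb | hb
  case inr =>
    rw [ttsum_pyRange_nil (by omega : b ≤ (0:Int)), ttsum_pyRange_nil (by omega : b ≤ a + 1)]
    rfl
  case inl =>
    obtain ⟨m, rfl⟩ : ∃ m : Nat, b = (m : Int) := ⟨b.toNat, (Int.toNat_of_nonneg hb.le).symm⟩
    exact ttsum_filter_aux a ha m

lemma ttsum_occ_aux (nums : List Int) (m : Nat) (v : Int) :
    ((PySem.List.pyRange 0 (m : Int)).foldl
        (fun d i => d.insert (PySem.List.pyGetD nums i 0) (d.getD (PySem.List.pyGetD nums i 0) [] ++ [i]))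
        PySem.Dict.empty).getD v []
      = (PySem.List.pyRange 0 (m : Int)).filter (fun i => decide (PySem.List.pyGetD nums i 0 = v)) := by
  induction m with
  | zero =>
    rw [Nat.cast_zero, ttsum_pyRange_nil (le_refl 0)]
    simp [PySem.Dict.getD_empty]
  | succ k ih =>
    have h1 : ((k+1 : Nat) : Int) = (k : Int) + 1 := by push_cast; ring
    rw [h1, PySem.List.pyRange_one_succ_right (by positivity : (0:Int) ≤ (k:Int)),
        List.foldl_append, List.filter_append]
    simp only [List.foldl_cons, List.foldl_nil]
    rw [PySem.Dict.getD_insert]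
    by_cases hv : v = PySem.List.pyGetD nums (k : Int) 0
    · subst hv
      rw [if_pos rfl, ih]
      simp
    · rw [if_neg hv, ih]
      have hv' : ¬ (PySem.List.pyGetD nums ((k : Nat) : Int) 0 = v) := fun h => hv h.symm
      simp
      simpa using hv'

lemma ttsum_occ (nums : List Int) (v : Int) :
    (ttsumOcc nums).getD v []
      = (PySem.List.pyRange 0 (PySem.List.len nums)).filter (fun i => decide (PySem.List.pyGetD nums i 0 = v)) := by
  have h := ttsum_occ_aux nums nums.length v
  simpa [ttsumOcc, PySem.List.len] using h

lemma ttsum_pair_step (nums : List Int) (t f : Int) (hf : 0 ≤ f) (acc : List (List Int)) :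
    (PySem.List.pyRange (f+1) (PySem.List.len nums)).foldl
        (fun acc s => if PySem.List.pyGetD nums s 0 = t - PySem.List.pyGetD nums f 0 then acc ++ [[f, s]] else acc) acc
      = ((ttsumOcc nums).getD (t - PySem.List.pyGetD nums f 0) []).foldl
        (fun acc s => if f < s then acc ++ [[f, s]] else acc) acc := by
  have hA := PySem.List.foldl_append_if
    (fun s => decide (PySem.List.pyGetD nums s 0 = t - PySem.List.pyGetD nums f 0))
    (fun s => [f, s]) (PySem.List.pyRange (f+1) (PySem.List.len nums)) acc
  have hB := PySem.List.foldl_append_if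
    (fun s => decide (f < s)) (fun s => [f, s]) ((ttsumOcc nums).getD (t - PySem.List.pyGetD nums f 0) []) acc
  simp only [decide_eq_true_eq] at hA hB
  rw [hA, hB, ttsum_occ, List.filter_filter,
      ← ttsum_filter_pyRange f (PySem.List.len nums) hf, List.filter_filter]
  congr 1
  congr 1
  apply List.filter_congr
  intro x _
  rw [Bool.and_comm]

lemma ttsum_trip_step (nums : List Int) (t f s : Int) (hs : 0 ≤ s) (acc : List (List Int)) :
    (PySem.List.pyRange (s+1) (PySem.List.len nums)).foldl
        (fun acc l => if PySem.List.pyGetD nums s 0 + PySem.List.pyGetD nums l 0 = t - PySem.List.pyGetD nums f 0 then acc ++ [[f, s, l]] else acc) acc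
      = ((ttsumOcc nums).getD (t - PySem.List.pyGetD nums f 0 - PySem.List.pyGetD nums s 0) []).foldl
        (fun acc l => if s < l then acc ++ [[f, s, l]] else acc) acc := by
  have hA := PySem.List.foldl_append_if
    (fun l => decide (PySem.List.pyGetD nums s 0 + PySem.List.pyGetD nums l 0 = t - PySem.List.pyGetD nums f 0))
    (fun l => [f, s, l]) (PySem.List.pyRange (s+1) (PySem.List.len nums)) acc
  have hB := PySem.List.foldl_append_if
    (fun l => decide (s < l)) (fun l => [f, s, l])
    ((ttsumOcc nums).getD (t - PySem.List.pyGetD nums f 0 - PySem.List.pyGetD nums s 0) []) acc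
  simp only [decide_eq_true_eq] at hA hB
  rw [hA, hB, ttsum_occ, List.filter_filter,
      ← ttsum_filter_pyRange s (PySem.List.len nums) hs, List.filter_filter]
  congr 1
  congr 1
  apply List.filter_congr
  intro x _
  have hiff : (PySem.List.pyGetD nums s 0 + PySem.List.pyGetD nums x 0 = t - PySem.List.pyGetD nums f 0)
      ↔ (PySem.List.pyGetD nums x 0 = t - PySem.List.pyGetD nums f 0 - PySem.List.pyGetD nums s 0) := by
    omega
  simp [hiff, Bool.and_comm]

-- ===== VERDICT (by name: the statement is the Claim_ definition above) =====
theorem ttsum_spec : Claim_equal_ttsum := by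
  intro nums t _
  show ttsum nums t = ttsum_alt nums t
  simp only [ttsum, ttsum_alt]
  have hpair :
      (PySem.List.pyRange 0 (PySem.List.len nums)).foldl (fun acc f =>
        (PySem.List.pyRange (f+1) (PySem.List.len nums)).foldl (fun acc s =>
          if PySem.List.pyGetD nums s 0 = t - PySem.List.pyGetD nums f 0 then acc ++ [[f, s]] else acc) acc) []
      = (PySem.List.pyRange 0 (PySem.List.len nums)).foldl (fun acc f =>
        ((ttsumOcc nums).getD (t - PySem.List.pyGetD nums f 0) []).foldl (fun acc s =>
          if f < s then acc ++ [[f, s]] else acc) acc) [] := by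
    apply PySem.List.foldl_congr_mem
    intro acc f hf
    rw [PySem.List.mem_pyRange_one] at hf
    exact ttsum_pair_step nums t f hf.1 acc
  rw [hpair]
  apply PySem.List.foldl_congr_mem
  intro acc f hf
  rw [PySem.List.mem_pyRange_one] at hf
  apply PySem.List.foldl_congr_mem
  intro acc2 s hs
  rw [PySem.List.mem_pyRange_one] at hs
  exact ttsum_trip_step nums t f s (by omega) acc2
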